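-- pv_equiv track=rewrite | github.com/cooleymr/imessage-spam-deleter | test.py | get_number_addresses
-- ===== SOURCE A (Python) =====
-- def get_number_addresses(messages):
--     number_count = {}
--     for message in messages:
--         number = message[0]
--         if number not in number_count:
--             number_count[number] = 1
--         else:
--             number_count[number] += 1
--     unique_numbers = [message for message in messages if number_count[message[0]] == 1]
--     return len(unique_numbers)
-- ===== SOURCE B (Python) =====
-- def get_number_addresses(messages):
--     once = set()
--     more = set()
--     for message in messages:
--         number = message[0]
--         if number in more:
--             continue
--         if number in once:
--             once.discard(number)
--             more.add(number)
--         else: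
--             once.add(number)
--     return len(once)
-- ===== Notes on version B (the rewrite author's own statement) =====
-- stated objective: alternative
-- what changed: B replaces A's frequency dict plus a second filter pass over the messages list by a single pass maintaining two sets (numbers seen exactly once, numbers seen more than once) and returns the size of the first set; no counts are kept at all.
import Mathlib
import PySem

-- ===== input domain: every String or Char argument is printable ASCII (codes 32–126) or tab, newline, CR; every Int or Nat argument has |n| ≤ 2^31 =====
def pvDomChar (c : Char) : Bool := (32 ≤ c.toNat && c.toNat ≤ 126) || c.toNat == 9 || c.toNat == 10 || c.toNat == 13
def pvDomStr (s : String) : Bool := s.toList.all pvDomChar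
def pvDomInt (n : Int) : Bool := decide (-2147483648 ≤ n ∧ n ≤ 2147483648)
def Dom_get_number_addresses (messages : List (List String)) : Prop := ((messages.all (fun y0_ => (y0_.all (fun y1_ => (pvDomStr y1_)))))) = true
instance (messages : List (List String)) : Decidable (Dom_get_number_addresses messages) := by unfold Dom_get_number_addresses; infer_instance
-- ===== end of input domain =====

-- B does a single pass with two sets (seen-once / seen-more) and returns the first set's size, replacing A's count dict + second filter pass over messages; objective: alternative.


-- ===== PORT A =====
def get_number_addresses (messages : List (List String)) : Int :=
  let number_count : PySem.Dict String Int :=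
    messages.foldl (fun d message =>
      let number := PySem.List.pyGetD message 0 ""   -- message[0]; Pre_ guarantees the index is in range
      if d.contains number = false then d.insert number 1
      else d.modify number 0 (· + 1)) PySem.Dict.empty
  let unique_numbers :=
    messages.filter (fun message => number_count.getD (PySem.List.pyGetD message 0 "") 0 == 1)
  (unique_numbers.length : Int)

-- ===== PORT B =====
def get_number_addresses_alt (messages : List (List String)) : Int :=
  let st : PySem.Set String × PySem.Set String :=   -- (once, more)
    messages.foldl (fun s message =>
      let number := PySem.List.pyGetD message 0 ""   -- message[0]; Pre_ guarantees the index is in range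
      if PySem.Set.contains s.2 number then s
      else if PySem.Set.contains s.1 number then
        (PySem.Set.discard s.1 number, PySem.Set.add s.2 number)
      else (PySem.Set.add s.1 number, s.2))
      (PySem.Set.empty, PySem.Set.empty)
  PySem.Set.len st.1

-- ===== PRECONDITION & SPEC =====
-- Pre_ excludes exactly the inputs where Python A raises IndexError: a message with no entries (message[0]).
def Pre_get_number_addresses (messages : List (List String)) : Prop :=
  ∀ m ∈ messages, m ≠ []
instance (messages : List (List String)) : Decidable (Pre_get_number_addresses messages) := by unfold Pre_get_number_addresses; infer_instance
def pvWitness_get_number_addresses : List (List String) := [["a", "x"], ["b"], ["a"]]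

def Spec_get_number_addresses (messages : List (List String)) (out : Int) : Prop := out = get_number_addresses_alt messages
instance (messages : List (List String)) (out : Int) : Decidable (Spec_get_number_addresses messages out) := by unfold Spec_get_number_addresses; infer_instance

-- ===== CLAIM (what is proved, stated in full; the proofs are below) =====
def Claim_equal_get_number_addresses : Prop := ∀ (messages : List (List String)), Dom_get_number_addresses messages → Pre_get_number_addresses messages → Spec_get_number_addresses messages (get_number_addresses messages)

-- ===== LEMMAS AND PROOFS =====

-- A's loop body collapses to Counter's step: the not-in branch inserts 1 = getD+1 on a fresh key, and += is insert of getD+1.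
theorem pv_step_eq (d : PySem.Dict String Int) (x : String) :
    (if d.contains x = false then d.insert x 1 else d.modify x 0 (· + 1))
      = d.insert x (d.getD x 0 + 1) := by
  by_cases h : d.contains x = false
  · have h0 : d.getD x 0 = 0 := PySem.Dict.getD_of_not_contains d 0 h
    rw [if_pos h, h0]
    norm_num
  · rw [if_neg h]
    rfl

-- A's loop builds Counter(heads).
theorem pv_dictA_eq (messages : List (List String)) :
    messages.foldl (fun d message =>
      let number := PySem.List.pyGetD message 0 ""
      if d.contains number = false then d.insert number 1
      else d.modify number 0 (· + 1)) PySem.Dict.empty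
    = PySem.Dict.counter (messages.map (fun m => PySem.List.pyGetD m 0 "")) := by
  rw [← PySem.Dict.foldl_insert_getD_add_one_eq_counter, List.foldl_map]
  exact PySem.List.foldl_congr_mem' messages _ _ _ (fun x _ d => pv_step_eq d (PySem.List.pyGetD x 0 ""))

-- B's loop step, on the heads list.
def pvStepB (s : PySem.Set String × PySem.Set String) (h : String) : PySem.Set String × PySem.Set String :=
  if PySem.Set.contains s.2 h then s
  else if PySem.Set.contains s.1 h then (PySem.Set.discard s.1 h, PySem.Set.add s.2 h)
  else (PySem.Set.add s.1 h, s.2)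

-- Loop invariant: after the pass over l, `once` holds exactly the elements with count 1 and `more` those with count ≥ 2.
theorem pv_loop_inv (l : List String) :
    (l.foldl pvStepB (PySem.Set.empty, PySem.Set.empty)).1.Nodup ∧
    (∀ x, x ∈ (l.foldl pvStepB (PySem.Set.empty, PySem.Set.empty)).1 ↔ l.count x = 1) ∧
    (∀ x, x ∈ (l.foldl pvStepB (PySem.Set.empty, PySem.Set.empty)).2 ↔ 2 ≤ l.count x) := by
  induction l using List.reverseRecOn with
  | nil => simp [PySem.Set.empty]
  | append_singleton l a ih =>
    obtain ⟨hnd, ho, hm⟩ := ih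
    rw [List.foldl_append, List.foldl_cons, List.foldl_nil]
    set s := l.foldl pvStepB (PySem.Set.empty, PySem.Set.empty) with hs
    have hcnt : ∀ x, (l ++ [a]).count x = l.count x + (if x = a then 1 else 0) := by
      intro x
      rw [List.count_append]
      by_cases hx : x = a
      · subst hx; simp
      · simp [hx, Ne.symm hx]
    unfold pvStepB
    by_cases h2 : a ∈ s.2
    · rw [if_pos ((PySem.Set.contains_iff _ _).mpr h2)]
      have ha2 : 2 ≤ l.count a := (hm a).mp h2
      refine ⟨hnd, fun x => ?_, fun x => ?_⟩ <;> rw [hcnt x] <;> by_cases hx : x = a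
      · rw [ho x, if_pos hx, hx]; omega
      · rw [ho x, if_neg hx]; omega
      · rw [hm x, if_pos hx, hx]; omega
      · rw [hm x, if_neg hx]; omega
    · rw [if_neg (by simpa [PySem.Set.contains_iff] using h2)]
      by_cases h1 : a ∈ s.1
      · rw [if_pos ((PySem.Set.contains_iff _ _).mpr h1)]
        have ha1 : l.count a = 1 := (ho a).mp h1
        refine ⟨PySem.Set.nodup_discard _ _ hnd, fun x => ?_, fun x => ?_⟩ <;> rw [hcnt x]
        · rw [PySem.Set.mem_discard, ho x]
          by_cases hx : x = a
          · rw [if_pos hx]; simp [hx]; omega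
          · rw [if_neg hx]; simp [hx]
        · rw [PySem.Set.mem_add, hm x]
          by_cases hx : x = a
          · rw [if_pos hx]; simp only [hx, or_true, true_iff]; omega
          · rw [if_neg hx]; simp [hx]
      · rw [if_neg (by simpa [PySem.Set.contains_iff] using h1)]
        have ha0 : l.count a = 0 := by
          have := hm a; have := ho a
          by_contra hc
          rcases Nat.lt_or_ge (l.count a) 2 with hlt | hge
          · exact h1 ((ho a).mpr (by omega))
          · exact h2 ((hm a).mpr hge)
        refine ⟨PySem.Set.nodup_add _ _ hnd, fun x => ?_, fun x => ?_⟩ <;> rw [hcnt x]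
        · rw [PySem.Set.mem_add, ho x]
          by_cases hx : x = a
          · rw [if_pos hx]; simp [hx, ha0]
          · rw [if_neg hx]; simp [hx]
        · rw [hm x]
          by_cases hx : x = a
          · rw [if_pos hx]; simp [hx, ha0]
          · rw [if_neg hx]; simp [hx]

-- Counting elements satisfying p (which forces count 1) equals counting distinct such elements.
theorem pv_countP_dedup (l : List String) (p : String → Bool)
    (hp : ∀ x, p x = true → l.count x = 1) :
    l.countP p = (PySem.Set.ofList l).countP p := by
  have hperm : (PySem.Set.ofList l).Perm l.dedup :=
    (List.perm_ext_iff_of_nodup (PySem.Set.nodup_ofList l) l.nodup_dedup).2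
      (fun a => by rw [PySem.Set.mem_ofList, List.mem_dedup])
  rw [hperm.countP_eq]
  rw [← List.sum_map_count_dedup_filter_eq_countP p l]
  rw [List.countP_eq_length_filter]
  have hmem : ∀ x ∈ l.dedup.filter p, l.count x = 1 :=
    fun x hx => hp x (List.of_mem_filter hx)
  calc (List.map l.count (l.dedup.filter p)).sum
      = (List.map (fun _ => 1) (l.dedup.filter p)).sum := congrArg _ (List.map_congr_left hmem)
    _ = (l.dedup.filter p).length := by simp

-- ===== VERDICT (by name: the statement is the Claim_ definition above) =====
theorem get_number_addresses_spec : Claim_equal_get_number_addresses := by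
  intro messages _ _
  show get_number_addresses messages = get_number_addresses_alt messages
  unfold get_number_addresses get_number_addresses_alt
  simp only [pv_dictA_eq]
  set heads := messages.map (fun m => PySem.List.pyGetD m 0 "") with hheads
  -- B side: the fold over messages is the fold pvStepB over heads
  have hfold : messages.foldl (fun s message =>
      let number := PySem.List.pyGetD message 0 ""
      if PySem.Set.contains s.2 number then s
      else if PySem.Set.contains s.1 number then
        (PySem.Set.discard s.1 number, PySem.Set.add s.2 number)
      else (PySem.Set.add s.1 number, s.2))
      (PySem.Set.empty, PySem.Set.empty)
    = heads.foldl pvStepB (PySem.Set.empty, PySem.Set.empty) := by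
    rw [hheads, List.foldl_map]; rfl
  rw [hfold]
  obtain ⟨hnd, ho, _⟩ := pv_loop_inv heads
  set once := (heads.foldl pvStepB (PySem.Set.empty, PySem.Set.empty)).1
  -- A side: the filter predicate is "head occurs once in heads"
  simp only [PySem.Dict.getD_counter]
  rw [← List.countP_eq_length_filter]
  set p : String → Bool := fun h => ((heads.count h : Int) == 1) with hpdef
  have hp : ∀ x, p x = true → heads.count x = 1 := by
    intro x hx
    rw [hpdef] at hx
    exact_mod_cast beq_iff_eq.mp hx
  have hA : (List.countP (fun m => ((heads.count (PySem.List.pyGetD m 0 "") : Int) == 1)) messages)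
      = List.countP p heads := by
    rw [hheads, List.countP_map]; rfl
  rw [hA, pv_countP_dedup heads p hp]
  -- countP p over the distinct heads = length of once: both nodup with the same membership
  have hperm : ((PySem.Set.ofList heads).filter p).Perm once := by
    refine (List.perm_ext_iff_of_nodup ((PySem.Set.nodup_ofList heads).filter p) hnd).2 ?_
    intro x
    rw [List.mem_filter, PySem.Set.mem_ofList, ho x]
    constructor
    · rintro ⟨_, hx⟩; exact hp x hx
    · intro hx
      refine ⟨List.count_pos_iff.mp (by omega), ?_⟩
      rw [hpdef]; simp [hx]
  rw [List.countP_eq_length_filter, hperm.length_eq]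
  simp [PySem.Set.len]
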